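-- pv_equiv track=rewrite | github.com/robynskyrme/scrapbook | words-as-base26.py | assign_value
-- ===== SOURCE A (Python) =====
-- def get_alph(letter):
--     return ord(letter)-96
--
-- def assign_value(word):
--
--     value = 0
--
--     for countback in range(len(word),0,-1):
--         letter_placevalue = (len(word)-countback)
--         print (letter_placevalue)
--         # Value 0-25 of individual letter
--         letterval = get_alph(word[countback-1])
--         value = value + letterval*(26**letter_placevalue)
--
--     return value
-- ===== SOURCE B (Python) =====
-- def get_alph(letter):
--     return ord(letter)-96
--
-- def assign_value(word):
--     value = 0
--     for i, letter in enumerate(word):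
--         print(i)
--         value = value*26 + get_alph(letter)
--     return value
-- ===== Notes on version B (the rewrite author's own statement) =====
-- stated objective: faster
-- what changed: Replaces the backwards countdown over indices with independent letterval*26**placevalue power terms by a left-to-right Horner accumulation (value = value*26 + letter) over enumerate(word), removing the per-iteration bignum exponentiation 26**placevalue.
import Mathlib
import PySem

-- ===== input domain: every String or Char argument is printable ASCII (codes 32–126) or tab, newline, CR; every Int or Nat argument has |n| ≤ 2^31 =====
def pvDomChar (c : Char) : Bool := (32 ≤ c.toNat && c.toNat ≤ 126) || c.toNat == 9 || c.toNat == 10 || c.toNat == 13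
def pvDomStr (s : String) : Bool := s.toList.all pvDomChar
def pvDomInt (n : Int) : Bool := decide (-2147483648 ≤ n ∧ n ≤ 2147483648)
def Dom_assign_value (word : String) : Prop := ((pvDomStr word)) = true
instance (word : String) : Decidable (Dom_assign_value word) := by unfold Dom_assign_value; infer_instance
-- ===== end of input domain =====

-- B replaces A's countdown over indices with per-position power terms by a left-to-right
-- Horner accumulation, avoiding the per-iteration 26**placevalue exponentiation (objective: faster, measured). Equivalence is about the RETURN value only:
-- both Pythons also print the place values 0..len-1 (in the same order), not ported here.

-- ===== PORT A =====
def get_alph (letter : Char) : Int := (letter.toNat : Int) - 96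

def assign_value (word : String) : Int :=
  (PySem.List.pyRange (word.toList.length : Int) 0 (-1)).foldl
    (fun value countback =>
      let letter_placevalue : Int := (word.toList.length : Int) - countback
      -- word[countback-1]: always in range here, so the IndexError case never fires
      let letterval : Int := ((PySem.List.pyGet? word.toList (countback - 1)).map get_alph).getD 0
      value + letterval * 26 ^ letter_placevalue.toNat)
    0

-- ===== PORT B =====
def assign_value_alt (word : String) : Int :=
  word.toList.foldl (fun value letter => value * 26 + get_alph letter) 0

-- ===== PRECONDITION & SPEC =====
def Spec_assign_value (word : String) (out : Int) : Prop := out = assign_value_alt word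
instance (word : String) (out : Int) : Decidable (Spec_assign_value word out) := by unfold Spec_assign_value; infer_instance

-- ===== CLAIM (what is proved, stated in full; the proofs are below) =====
def Claim_equal_assign_value : Prop := ∀ (word : String), Dom_assign_value word → Spec_assign_value word (assign_value word)

-- ===== LEMMAS AND PROOFS =====

-- A's fold, phrased over the character list
def assignValList (cs : List Char) : Int :=
  (PySem.List.pyRange (cs.length : Int) 0 (-1)).foldl
    (fun value countback =>
      value + (((PySem.List.pyGet? cs (countback - 1)).map get_alph).getD 0)
        * 26 ^ (((cs.length : Int) - countback).toNat))
    0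

lemma assign_value_eq_list (word : String) : assign_value word = assignValList word.toList := rfl

lemma assignValList_nil : assignValList [] = 0 := by
  simp [assignValList, PySem.List.pyRange_neg_one_eq_nil]

lemma assignValList_snoc (cs : List Char) (c : Char) :
    assignValList (cs ++ [c]) = 26 * assignValList cs + get_alph c := by
  have hlen : ((cs ++ [c]).length : Int) = (cs.length : Int) + 1 := by
    simp
  have hcons : PySem.List.pyRange ((cs.length : Int) + 1) 0 (-1)
      = ((cs.length : Int) + 1) :: PySem.List.pyRange (cs.length : Int) 0 (-1) := by
    have h := PySem.List.pyRange_neg_one_cons (a := (cs.length : Int) + 1) (b := 0) (by positivity)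
    simpa using h
  unfold assignValList
  rw [hlen, hcons]
  simp only [List.foldl_cons]
  -- first iteration handles the appended last character
  have hget : PySem.List.pyGet? (cs ++ [c]) ((cs.length : Int) + 1 - 1) = some c := by
    have : ((cs.length : Int) + 1 - 1) = (cs.length : Int) := by ring
    rw [this]
    simpa using PySem.List.pyGet?_append_length cs [] c
  rw [hget]
  have hexp0 : (((cs.length : Int) + 1) - ((cs.length : Int) + 1)).toNat = 0 := by omega
  -- turn both remaining folds into sums
  rw [PySem.List.foldl_add, PySem.List.foldl_add]
  have hmap : (PySem.List.pyRange (cs.length : Int) 0 (-1)).map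
        (fun countback =>
          (((PySem.List.pyGet? (cs ++ [c]) (countback - 1)).map get_alph).getD 0)
            * 26 ^ ((((cs.length : Int) + 1) - countback).toNat))
      = (PySem.List.pyRange (cs.length : Int) 0 (-1)).map
        (fun countback => 26 * ((((PySem.List.pyGet? cs (countback - 1)).map get_alph).getD 0)
            * 26 ^ (((cs.length : Int) - countback).toNat))) := by
    apply List.map_congr_left
    intro x hx
    have hx' : (0:Int) < x ∧ x ≤ (cs.length : Int) := PySem.List.mem_pyRange_neg_one.mp hx
    have h1 : 0 ≤ x - 1 := by omega
    have h2 : x - 1 < (cs.length : Int) := by omega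
    have hgetx : PySem.List.pyGet? (cs ++ [c]) (x - 1) = PySem.List.pyGet? cs (x - 1) := by
      rw [PySem.List.pyGet?_of_nonneg _ h1, PySem.List.pyGet?_of_nonneg _ h1]
      exact List.getElem?_append_left (by omega)
    have hexp : ((((cs.length : Int) + 1) - x).toNat) = (((cs.length : Int) - x).toNat) + 1 := by
      omega
    rw [hgetx, hexp, pow_succ]
    ring
  rw [hmap, List.sum_map_mul_left, hexp0]
  simp only [Option.map_some, Option.getD_some, pow_zero, mul_one]
  ring

lemma list_eq (cs : List Char) :
    assignValList cs = cs.foldl (fun value letter => value * 26 + get_alph letter) 0 := by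
  induction cs using List.reverseRecOn with
  | nil => simp [assignValList_nil]
  | append_singleton cs c ih =>
      rw [assignValList_snoc, ih, List.foldl_append]
      simp [List.foldl_cons]
      ring

-- ===== VERDICT (by name: the statement is the Claim_ definition above) =====
theorem assign_value_spec : Claim_equal_assign_value := by
  intro word _
  unfold Spec_assign_value assign_value_alt
  rw [assign_value_eq_list, list_eq]
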